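-- pv_equiv track=rewrite | github.com/MiZuii/AOC_2023 | day03/puzzle2.py | num_idxs
-- ===== SOURCE A (Python) =====
-- def num_idxs(line: str):
--     idxs = []
--     num = False
--     for i, chr in enumerate(line):
--         if chr.isdigit() and not num:
--             num = True
--             idxs.append(i)
--         if not chr.isdigit() and num:
--             idxs.append(i)
--             num = False
--     if num:
--         idxs.append(len(line))
--     return idxs
-- ===== SOURCE B (Python) =====
-- def num_idxs(line: str):
--     idxs = []
--     i = 0
--     n = len(line)
--     while i < n:
--         if line[i].isdigit():
--             start = i
--             i += 1
--             while i < n and line[i].isdigit():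
--                 i += 1
--             idxs.append(start)
--             idxs.append(i)
--         else:
--             i += 1
--     return idxs
-- ===== Notes on version B (the rewrite author's own statement) =====
-- stated objective: alternative
-- what changed: Replaces the per-character boolean state machine (num flag plus trailing fix-up for a run ending at end-of-line) with run-based scanning: on meeting a digit, consume the whole run at once and append its start and one-past-end indices, so no flag and no trailing branch exist.
import Mathlib
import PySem

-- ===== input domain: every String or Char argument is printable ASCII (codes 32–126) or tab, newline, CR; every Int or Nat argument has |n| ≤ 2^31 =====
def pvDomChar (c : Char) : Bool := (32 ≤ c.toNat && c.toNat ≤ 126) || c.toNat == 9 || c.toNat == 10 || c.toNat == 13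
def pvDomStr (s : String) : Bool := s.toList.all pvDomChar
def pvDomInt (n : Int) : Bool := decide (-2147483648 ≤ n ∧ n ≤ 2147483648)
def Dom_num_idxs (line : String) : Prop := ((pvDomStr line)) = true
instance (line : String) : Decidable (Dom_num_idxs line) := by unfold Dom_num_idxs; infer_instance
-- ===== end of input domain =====

-- B replaces A's per-character boolean state machine by run-based scanning (consume
-- each digit run at once); same O(n) cost, no flag and no trailing branch.

-- ===== PORT A =====
-- the for loop over enumerate(line), state (idxs, num)
def numIdxsLoop : List Char → Nat → List Int → Bool → List Int × Bool
  | [], _, idxs, num => (idxs, num)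
  | c :: rest, i, idxs, num =>
    let p1 : List Int × Bool :=
      if PySem.Chars.isdigit c && !num then (idxs ++ [(i : Int)], true) else (idxs, num)
    let p2 : List Int × Bool :=
      if !(PySem.Chars.isdigit c) && p1.2 then (p1.1 ++ [(i : Int)], false) else p1
    numIdxsLoop rest (i + 1) p2.1 p2.2

def num_idxs (line : String) : List Int :=
  let cs := line.toList
  let r := numIdxsLoop cs 0 [] false
  if r.2 then r.1 ++ [(cs.length : Int)] else r.1

-- ===== PORT B =====
-- run-based scan: at a digit, take the whole run, emit start and one-past-end
def numIdxsRuns : List Char → Nat → List Int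
  | [], _ => []
  | c :: rest, i =>
    if PySem.Chars.isdigit c then
      let k := (rest.takeWhile PySem.Chars.isdigit).length
      (i : Int) :: ((i + 1 + k : Nat) : Int) :: numIdxsRuns (rest.drop k) (i + 1 + k)
    else
      numIdxsRuns rest (i + 1)
termination_by cs _ => cs.length
decreasing_by
  · simp only [List.length_drop, List.length_cons]; omega
  · simp

def num_idxs_alt (line : String) : List Int :=
  numIdxsRuns line.toList 0

-- ===== PRECONDITION & SPEC =====
def Spec_num_idxs (line : String) (out : List Int) : Prop := out = num_idxs_alt line
instance (line : String) (out : List Int) : Decidable (Spec_num_idxs line out) := by unfold Spec_num_idxs; infer_instance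

-- ===== CLAIM (what is proved, stated in full; the proofs are below) =====
def Claim_equal_num_idxs : Prop := ∀ (line : String), Dom_num_idxs line → Spec_num_idxs line (num_idxs line)

-- ===== LEMMAS AND PROOFS =====

-- finishing step of A: run the loop, then append the total length if still inside a run
def finishA (cs : List Char) (i : Nat) (acc : List Int) (num : Bool) (L : Nat) : List Int :=
  let r := numIdxsLoop cs i acc num
  if r.2 then r.1 ++ [(L : Int)] else r.1

theorem runs_cons_digit (c : Char) (rest : List Char) (i : Nat)
    (hd : PySem.Chars.isdigit c = true) :
    numIdxsRuns (c :: rest) i =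
      (i : Int) :: ((i + 1 + (rest.takeWhile PySem.Chars.isdigit).length : Nat) : Int) ::
        numIdxsRuns (rest.drop (rest.takeWhile PySem.Chars.isdigit).length)
          (i + 1 + (rest.takeWhile PySem.Chars.isdigit).length) := by
  rw [numIdxsRuns.eq_def]; simp [hd]

theorem runs_cons_nondigit (c : Char) (rest : List Char) (i : Nat)
    (hd : PySem.Chars.isdigit c = false) :
    numIdxsRuns (c :: rest) i = numIdxsRuns rest (i + 1) := by
  rw [numIdxsRuns.eq_def]; simp [hd]

theorem finishA_both (cs : List Char) :
    (∀ i acc, finishA cs i acc false (i + cs.length) = acc ++ numIdxsRuns cs i) ∧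
    (∀ i acc, finishA cs i acc true (i + cs.length) =
      acc ++ [((i + (cs.takeWhile PySem.Chars.isdigit).length : Nat) : Int)] ++
        numIdxsRuns (cs.drop (cs.takeWhile PySem.Chars.isdigit).length)
          (i + (cs.takeWhile PySem.Chars.isdigit).length)) := by
  induction cs with
  | nil =>
      constructor <;> intro i acc <;>
        simp [finishA, numIdxsLoop, numIdxsRuns]
  | cons c rest ih =>
      have hlen : ∀ i : Nat, i + (c :: rest).length = (i + 1) + rest.length := by
        intro i; simp [List.length_cons]; omega
      by_cases hd : PySem.Chars.isdigit c = true
      · constructor <;> intro i acc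
        · have h2 := ih.2 (i + 1) (acc ++ [(i : Int)])
          rw [runs_cons_digit c rest i hd, hlen i]
          simp only [finishA, numIdxsLoop, hd, Bool.not_false, Bool.and_self,
            if_true, Bool.not_true, Bool.false_and]
          simpa using h2
        · have h2 := ih.2 (i + 1) acc
          rw [hlen i]
          simp only [finishA, numIdxsLoop, hd, Bool.not_true, Bool.and_false,
            Bool.false_and]
          have htw : (c :: rest).takeWhile PySem.Chars.isdigit
              = c :: rest.takeWhile PySem.Chars.isdigit := by
            simp [hd]
          rw [htw]
          simp only [List.length_cons, List.drop_succ_cons]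
          have harith : i + ((rest.takeWhile PySem.Chars.isdigit).length + 1)
              = i + 1 + (rest.takeWhile PySem.Chars.isdigit).length := by omega
          rw [harith]
          simpa using h2
      · simp only [Bool.not_eq_true] at hd
        constructor <;> intro i acc
        · have h1 := ih.1 (i + 1) acc
          rw [runs_cons_nondigit c rest i hd, hlen i]
          simp only [finishA, numIdxsLoop, hd, Bool.false_and,
            Bool.not_false]
          simpa using h1
        · have h1 := ih.1 (i + 1) (acc ++ [(i : Int)])
          rw [hlen i]
          simp only [finishA, numIdxsLoop, hd, Bool.false_and,
            Bool.not_false, Bool.true_and]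
          have htw : (c :: rest).takeWhile PySem.Chars.isdigit = [] := by
            simp [hd]
          rw [htw]
          simp only [List.length_nil, List.drop_zero, Nat.add_zero]
          rw [runs_cons_nondigit c rest i hd]
          simpa using h1

theorem num_idxs_spec : Claim_equal_num_idxs := by
  intro line _
  unfold Spec_num_idxs num_idxs num_idxs_alt
  have h := (finishA_both line.toList).1 0 []
  simpa [finishA] using h
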